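-- pv_equiv track=rewrite | github.com/everysoftware/algorithms-course | greedy/points_cover.py | points_cover
-- ===== SOURCE A (Python) =====
-- def points_cover(points: list) -> list:
--     s = points.copy()
--     sol = []
--     while s:
--         x_m = min(s)
--         sol.append([x_m, x_m + 1])
--         s = [x for x in s if x > x_m + 1]
--     return sol
-- ===== SOURCE B (Python) =====
-- def points_cover(points: list) -> list:
--     # Sort once, then a single left-to-right pass: open a unit segment at each
--     # uncovered point and skip every point it covers.
--     pts = sorted(points)
--     sol = []
--     n = len(pts)
--     i = 0
--     while i < n:
--         x = pts[i]
--         sol.append([x, x + 1])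
--         i += 1
--         while i < n and pts[i] <= x + 1:
--             i += 1
--     return sol
-- ===== Notes on version B (the rewrite author's own statement) =====
-- stated objective: faster
-- what changed: Replaces the repeated min-and-filter passes over the remaining list with a single sort followed by one linear sweep that opens a unit segment at each uncovered point and skips the points it covers.
import Mathlib
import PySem

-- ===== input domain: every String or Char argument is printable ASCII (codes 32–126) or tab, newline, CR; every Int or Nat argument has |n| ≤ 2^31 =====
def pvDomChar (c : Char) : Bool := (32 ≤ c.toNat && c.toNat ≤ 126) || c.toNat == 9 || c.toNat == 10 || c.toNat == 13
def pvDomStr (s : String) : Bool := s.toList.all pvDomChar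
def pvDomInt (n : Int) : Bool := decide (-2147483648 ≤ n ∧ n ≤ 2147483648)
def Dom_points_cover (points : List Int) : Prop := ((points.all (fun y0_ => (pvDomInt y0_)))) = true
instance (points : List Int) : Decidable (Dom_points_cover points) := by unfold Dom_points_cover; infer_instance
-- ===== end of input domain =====

-- B replaces A's repeated min-and-filter passes by one sort and a single linear sweep (objective: faster).

-- ===== PORT A =====
-- termination helper for A's loop: the filter drops the minimum, so the list shrinks
theorem pvFilterLtOfMem {α : Type} {l : List α} {p : α → Bool} {x : α}
    (hx : x ∈ l) (hp : p x = false) : (l.filter p).length < l.length := by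
  rcases Nat.lt_or_ge (l.filter p).length l.length with h | h
  · exact h
  · exfalso
    have hsub : (l.filter p).Sublist l := List.filter_sublist
    have heq : l.filter p = l := hsub.eq_of_length (Nat.le_antisymm hsub.length_le h)
    rw [← heq, List.mem_filter] at hx
    simp [hp] at hx

-- A's while loop: take the minimum, emit [m, m+1], keep only points > m + 1
def pointsCoverLoopA (s : List Int) : List (List Int) :=
  match h : PySem.List.min? s (fun x => x) with
  | none => []
  | some m =>
      [m, m + 1] :: pointsCoverLoopA (s.filter (fun x => decide (m + 1 < x)))
termination_by s.length
decreasing_by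
  simp only [List.length_unattach]
  have := pvFilterLtOfMem (l := s.attach) (p := fun x => decide (m + 1 < x.val))
    (x := ⟨m, PySem.List.min?_mem h⟩) (List.mem_attach s _) (by simp)
  simpa using this

def points_cover (points : List Int) : List (List Int) :=
  pointsCoverLoopA points

-- ===== PORT B =====
-- B's outer while loop; the inner while (skip the points the segment covers) is the dropWhile
def pointsCoverLoopB (l : List Int) : List (List Int) :=
  match l with
  | [] => []
  | x :: rest =>
      [x, x + 1] :: pointsCoverLoopB (rest.dropWhile (fun y => decide (y ≤ x + 1)))
termination_by l.length
decreasing_by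
  exact Nat.lt_succ_of_le (List.length_dropWhile_le _ _)

def points_cover_alt (points : List Int) : List (List Int) :=
  pointsCoverLoopB (PySem.List.sorted points (fun x => x) false)

-- ===== PRECONDITION & SPEC =====
def Spec_points_cover (points : List Int) (out : List (List Int)) : Prop := out = points_cover_alt points
instance (points : List Int) (out : List (List Int)) : Decidable (Spec_points_cover points out) := by unfold Spec_points_cover; infer_instance

-- ===== CLAIM (what is proved, stated in full; the proofs are below) =====
def Claim_equal_points_cover : Prop := ∀ (points : List Int), Dom_points_cover points → Spec_points_cover points (points_cover points)

-- ===== LEMMAS AND PROOFS =====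

-- unfolding lemmas for the two loops
theorem loopA_nil : pointsCoverLoopA [] = [] := by
  rw [pointsCoverLoopA.eq_def]
  rfl

theorem loopA_some {s : List Int} {m : Int} (h : PySem.List.min? s (fun x => x) = some m) :
    pointsCoverLoopA s = [m, m + 1] :: pointsCoverLoopA (s.filter (fun x => decide (m + 1 < x))) := by
  rw [pointsCoverLoopA.eq_def]
  split
  · next heq => rw [heq] at h; cases h
  · next m' heq => rw [heq] at h; injection h with h; subst h; rfl

theorem loopB_nil : pointsCoverLoopB [] = [] := by
  rw [pointsCoverLoopB.eq_def]

theorem loopB_cons (x : Int) (rest : List Int) :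
    pointsCoverLoopB (x :: rest)
      = [x, x + 1] :: pointsCoverLoopB (rest.dropWhile (fun y => decide (y ≤ x + 1))) := by
  rw [pointsCoverLoopB.eq_def]

-- A's loop depends only on the multiset of points
theorem loopA_perm : ∀ (n : ℕ) (s t : List Int), s.length ≤ n → s.Perm t →
    pointsCoverLoopA s = pointsCoverLoopA t := by
  intro n
  induction n with
  | zero =>
    intro s t hs hp
    have hsn : s = [] := List.length_eq_zero_iff.mp (Nat.le_zero.mp hs)
    subst hsn
    have : t = [] := hp.symm.eq_nil
    subst this; rfl
  | succ n ih =>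
    intro s t hs hp
    match hms : PySem.List.min? s (fun x => x), hmt : PySem.List.min? t (fun x => x) with
    | none, _ =>
      have hsnil : s = [] := (PySem.List.min?_eq_none_iff _ _).mp hms
      subst hsnil
      have : t = [] := hp.symm.eq_nil
      subst this; rfl
    | some m, none =>
      have htnil : t = [] := (PySem.List.min?_eq_none_iff _ _).mp hmt
      subst htnil
      have hsnil : s = [] := hp.eq_nil
      subst hsnil
      cases hms ▸ (PySem.List.min?_eq_none_iff ([] : List Int) (fun x => x)).mpr rfl
    | some m, some m' =>
      have hmm' : m = m' := by
        have h1 : m ≤ m' := PySem.List.min?_isMin hms m' (hp.symm.mem_iff.mp (PySem.List.min?_mem hmt))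
        have h2 : m' ≤ m := PySem.List.min?_isMin hmt m (hp.mem_iff.mp (PySem.List.min?_mem hms))
        omega
      subst hmm'
      rw [loopA_some hms, loopA_some hmt]
      congr 1
      exact ih _ _
        (by
          have := pvFilterLtOfMem (l := s) (p := fun x => decide (m + 1 < x))
            (PySem.List.min?_mem hms) (by simp)
          omega)
        (hp.filter _)

-- on a (≤)-sorted list, the minimum is the head
theorem min?_of_sorted_cons {x : Int} {rest : List Int}
    (hchain : ∀ y ∈ rest, x ≤ y) :
    PySem.List.min? (x :: rest) (fun v => v) = some x := by
  rw [PySem.List.min?_id_cons]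
  congr 1
  have hle : rest.foldl min x ≤ x := (PySem.List.foldl_min_le rest x).1
  rcases PySem.List.foldl_min_mem rest x with h | h
  · exact h
  · exact le_antisymm hle (hchain _ h)

-- on a (≤)-sorted list, filtering by (a < ·) is dropping the ≤-a prefix
theorem filter_eq_dropWhile_of_sorted (a : Int) :
    ∀ (l : List Int), l.Pairwise (· ≤ ·) →
    l.filter (fun x => decide (a < x)) = l.dropWhile (fun x => decide (x ≤ a)) := by
  intro l
  induction l with
  | nil => intro _; rfl
  | cons y ys ih =>
    intro hp
    rw [List.pairwise_cons] at hp
    by_cases hy : y ≤ a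
    · rw [List.filter_cons_of_neg (by simp only [decide_eq_true_eq, not_lt]; omega),
        List.dropWhile_cons_of_pos (by simp [hy])]
      exact ih hp.2
    · rw [List.filter_cons_of_pos (by simp only [decide_eq_true_eq]; omega),
        List.dropWhile_cons_of_neg (by simp only [decide_eq_true_eq, not_le]; omega)]
      congr 1
      exact List.filter_eq_self.mpr (fun z hz => by
        simp only [decide_eq_true_eq]
        have := hp.1 z hz
        omega)

-- on a (≤)-sorted list, A's loop and B's sweep coincide
theorem loopA_eq_loopB : ∀ (n : ℕ) (l : List Int), l.length ≤ n → l.Pairwise (· ≤ ·) →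
    pointsCoverLoopA l = pointsCoverLoopB l := by
  intro n
  induction n with
  | zero =>
    intro l hl _
    have : l = [] := List.length_eq_zero_iff.mp (Nat.le_zero.mp hl)
    subst this
    rw [loopA_nil, loopB_nil]
  | succ n ih =>
    intro l hl hp
    match l with
    | [] => rw [loopA_nil, loopB_nil]
    | x :: rest =>
      rw [List.pairwise_cons] at hp
      have hmin := min?_of_sorted_cons hp.1
      rw [loopA_some hmin, loopB_cons]
      congr 1
      have hfc : (x :: rest).filter (fun v => decide (x + 1 < v))
          = rest.filter (fun v => decide (x + 1 < v)) := by
        rw [List.filter_cons_of_neg (by simp only [decide_eq_true_eq, not_lt]; omega)]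
      rw [hfc, filter_eq_dropWhile_of_sorted (x + 1) rest hp.2]
      exact ih _ (by
          have := List.length_dropWhile_le (fun y => decide (y ≤ x + 1)) rest
          simp only [List.length_cons] at hl
          omega)
        (hp.2.sublist (List.dropWhile_sublist _))

-- ===== VERDICT (by name: the statement is the Claim_ definition above) =====
theorem points_cover_spec : Claim_equal_points_cover := by
  intro points _
  unfold Spec_points_cover points_cover points_cover_alt
  have hperm : (PySem.List.sorted points (fun x => x) false).Perm points :=
    PySem.List.sorted_perm points (fun x => x) false
  rw [loopA_perm points.length points (PySem.List.sorted points (fun x => x) false)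
      le_rfl hperm.symm]
  exact loopA_eq_loopB _ _ le_rfl (PySem.List.sorted_pairwise points (fun x => x))
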